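-- pv_equiv track=rewrite | github.com/pypi-data/pypi-mirror-90 | packages/aiopslibs/aiopslibs-1.5.0.tar.gz/aiopslibs-1.5.0/aiopslibs/utils.py | _create_config_values
-- ===== SOURCE A (Python) =====
-- def _create_config_values(args):
--     """creation of dictionary containing keys and values for conf file
--
--     Arguments:
--         args {array} -- which contains arguments passed in parameters
--
--     Returns:
--         {dict} -- contains information that will be in yaml config file.
--     """
--     config_values = {}
--     last_value = 0
--     for index, value in enumerate(args):
--         if index == 0:
--             continue
--         if index % 2 != 0:
--             last_value = value
--         else:
--             if value.isnumeric():
--                 config_values[last_value] = value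
--             else:
--                 config_values[last_value] = '"' + value + '"'
--
--     return config_values
-- ===== SOURCE B (Python) =====
-- def _create_config_values(args):
--     """Staged construction: slice out the key positions and the value positions,
--     quote the non-numeric values in a separate pass, then pair them with
--     dict(zip(...)) (zip's truncation drops a trailing unpaired key)."""
--     keys = args[1::2]
--     values = args[2::2]
--     quoted = [v if v.isnumeric() else '"' + v + '"' for v in values]
--     return dict(zip(keys, quoted))
-- ===== Notes on version B (the rewrite author's own statement) =====
-- stated objective: simpler
-- what changed: Replaces A's single enumerate loop with index-parity branches and a last_value accumulator by staged passes: slice out keys args[1::2] and values args[2::2], quote the values in a separate pass, and build the dict with dict(zip(keys, quoted)).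
import Mathlib
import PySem

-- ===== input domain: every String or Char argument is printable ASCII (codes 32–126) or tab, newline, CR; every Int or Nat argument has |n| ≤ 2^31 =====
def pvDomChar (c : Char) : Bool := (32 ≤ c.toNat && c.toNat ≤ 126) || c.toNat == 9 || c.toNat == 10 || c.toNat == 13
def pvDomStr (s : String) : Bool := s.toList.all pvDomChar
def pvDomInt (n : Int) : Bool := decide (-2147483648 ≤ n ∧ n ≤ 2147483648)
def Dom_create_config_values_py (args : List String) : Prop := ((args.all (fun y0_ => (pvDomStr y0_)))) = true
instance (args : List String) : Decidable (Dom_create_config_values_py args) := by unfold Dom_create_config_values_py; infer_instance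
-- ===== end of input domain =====

-- B builds the dict in stages — slice out the key positions args[1::2] and the value
-- positions args[2::2], quote the values in a separate pass, then dict(zip(...)) —
-- instead of A's single enumerate loop with index-parity branches and a last_value
-- accumulator (simpler; same cost). On the ASCII domain str.isnumeric coincides with
-- PySem.Str.strIsdigit.

-- ===== PORT A =====
-- loop body of A's `for index, value in enumerate(args)`; state = (config_values, last_value)
def aStep (st : PySem.Dict String String × String) (iv : Int × String) : PySem.Dict String String × String :=
  if iv.1 == 0 then st
  else if PySem.Int.mod iv.1 2 != 0 then (st.1, iv.2)
  else if PySem.Str.strIsdigit iv.2 then (PySem.Dict.insert st.1 st.2 iv.2, st.2)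
  else (PySem.Dict.insert st.1 st.2 ("\"" ++ iv.2 ++ "\""), st.2)

-- Python's initial `last_value = 0` (an int) is dead: index 2 is only reached after
-- index 1 has assigned a string; we initialise with "" in its place.
def create_config_values_py (args : List String) : List (String × String) :=
  (((PySem.List.enumerate args 0).foldl aStep (PySem.Dict.empty, "")).1).items

-- ===== PORT B =====
-- keys = args[1::2]; values = args[2::2]; quoted = [...]; dict(zip(keys, quoted))
-- (step 2 ≠ 0, so slice? is always `some`; .getD [] just strips the Option)
def create_config_values_py_alt (args : List String) : List (String × String) :=
  let keys := (PySem.List.slice? args (some 1) none 2).getD []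
  let values := (PySem.List.slice? args (some 2) none 2).getD []
  let quoted := values.map (fun v => if PySem.Str.strIsdigit v then v else "\"" ++ v ++ "\"")
  ((keys.zip quoted).foldl (fun d kv => PySem.Dict.insert d kv.1 kv.2) PySem.Dict.empty).items

-- ===== PRECONDITION & SPEC =====
def Spec_create_config_values_py (args : List String) (out : List (String × String)) : Prop := out = create_config_values_py_alt args
instance (args : List String) (out : List (String × String)) : Decidable (Spec_create_config_values_py args out) := by unfold Spec_create_config_values_py; infer_instance

-- ===== CLAIM (what is proved, stated in full; the proofs are below) =====
def Claim_equal_create_config_values_py : Prop := ∀ (args : List String), Dom_create_config_values_py args → Spec_create_config_values_py args (create_config_values_py args)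

-- ===== LEMMAS AND PROOFS =====

-- proof-side view of xs[1::2]: the elements at odd indices
def oddElems {α : Type} : List α → List α
  | _ :: b :: rest => b :: oddElems rest
  | _ => []

theorem fm_odd (α : Type) (xs : List α) : ∀ (m : Nat), xs.length ≤ 2*m + 1 →
    List.filterMap (fun k => xs[2*k+1]?) (List.range m) = oddElems xs := by
  induction xs using oddElems.induct with
  | case1 a b rest ih =>
    intro m hm
    match m, hm with
    | m'+1, hm =>
      rw [List.range_succ_eq_map, List.filterMap_cons]
      simp only [List.filterMap_map]
      have : (fun k => ((a :: b :: rest)[2*(k+1)+1]?)) ∘ id = fun k => rest[2*k+1]? := by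
        funext k
        simp only [Function.comp, id]
        have : 2*(k+1)+1 = (2*k+1) + 2 := by omega
        rw [this]
        simp [List.getElem?_cons_succ]
      simp only [Function.comp]
      have hb : (a :: b :: rest)[2*0+1]? = some b := by simp
      rw [hb]
      have hrw : List.filterMap (fun k => (a :: b :: rest)[2*(k+1)+1]?) (List.range m')
          = List.filterMap (fun k => rest[2*k+1]?) (List.range m') := by
        apply List.filterMap_congr
        intro k _
        have h2 : 2*(k+1)+1 = (2*k+1) + 2 := by omega
        rw [h2]; simp
      rw [hrw, ih m' (by simp at hm ⊢; omega)]
      rfl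
  | case2 l hne =>
    intro m hm
    have : oddElems l = [] := by
      match l, hne with
      | [], _ => rfl
      | [a], _ => rfl
      | a :: b :: r, h => exact absurd rfl (h a b r)
    rw [this, List.filterMap_eq_nil_iff]
    intro x hx
    simp only [List.mem_range] at hx
    apply List.getElem?_eq_none
    match l, hne with
    | [], _ => simp
    | [a], _ => simp
    | a :: b :: r, h => exact absurd rfl (h a b r)

theorem slice_odd_eq (α : Type) (xs : List α) :
    PySem.List.slice? xs (some 1) none 2 = some (oddElems xs) := by
  cases xs with
  | nil => rfl
  | cons x t =>
    simp only [PySem.List.slice?, PySem.List.sliceIndices]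
    norm_num
    by_cases ht : 0 < t.length
    · rw [if_pos ht]
      have hc : ((↑t.length + 2 - 1 : Int) / 2).toNat = (t.length + 1) / 2 := by omega
      rw [hc]
      have hfm : List.filterMap (fun (k : Nat) => (x :: t)[((1:Int) + 2 * (k:Int)).toNat]?) (List.range ((t.length + 1) / 2))
          = List.filterMap (fun k => (x :: t)[2*k+1]?) (List.range ((t.length + 1) / 2)) := by
        apply List.filterMap_congr
        intro k _
        have : ((1 : Int) + 2 * (k:Int)).toNat = 2*k+1 := by omega
        rw [this]
      rw [hfm, fm_odd α (x :: t) ((t.length + 1) / 2) (by simp; omega)]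
    · rw [if_neg ht]
      have : t = [] := by simpa using List.length_eq_zero_iff.mp (by omega)
      subst this
      rfl

theorem slice_even_eq (α : Type) (xs : List α) :
    PySem.List.slice? xs (some 2) none 2 = some (oddElems xs.tail) := by
  match xs with
  | [] => rfl
  | [x] => rfl
  | x :: y :: t =>
    simp only [PySem.List.slice?, PySem.List.sliceIndices]
    norm_num
    have hmin : min (2:Int) (↑t.length + 1 + 1) = 2 := by omega
    rw [hmin]
    by_cases ht : 0 < t.length
    · rw [if_pos (by omega : (2:Int) ≤ ↑t.length + 1)]
      have hc : ((↑t.length + 1 + 1 - 2 + 2 - 1 : Int) / 2).toNat = (t.length + 1) / 2 := by omega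
      rw [hc]
      have hfm : List.filterMap (fun (k : Nat) => (x :: y :: t)[((2:Int) + 2 * (k:Int)).toNat]?) (List.range ((t.length + 1) / 2))
          = List.filterMap (fun (k : Nat) => (y :: t)[2*k+1]?) (List.range ((t.length + 1) / 2)) := by
        apply List.filterMap_congr
        intro k _
        have h2 : ((2 : Int) + 2 * (k:Int)).toNat = (2*k+1) + 1 := by omega
        rw [h2]
        simp
      rw [hfm, fm_odd α (y :: t) ((t.length + 1) / 2) (by simp; omega)]
    · rw [if_neg (by omega : ¬ ((2:Int) ≤ ↑t.length + 1))]
      have : t = [] := List.length_eq_zero_iff.mp (by omega)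
      subst this
      rfl


-- the two interleaved slices, zipped, are the consecutive pairs of the tail
def pyPairs {α : Type} : List α → List (α × α)
  | a :: b :: rest => (a, b) :: pyPairs rest
  | _ => []

theorem zip_slices_eq_pairs (α : Type) : ∀ (t : List α) (x : α),
    (oddElems (x :: t)).zip (oddElems t) = pyPairs t := by
  intro t
  induction t using pyPairs.induct with
  | case1 a b rest ih =>
    intro x
    simp only [oddElems, pyPairs, List.zip_cons_cons]
    rw [ih b]
  | case2 l hne =>
    intro x
    match l, hne with
    | [], _ => rfl
    | [a], _ => rfl
    | a :: b :: r, h => exact absurd rfl (h a b r)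

-- A's loop from an odd start index 2n+1 computes the pair fold (last_value is irrelevant).
def bStep (d : PySem.Dict String String) (kv : String × String) : PySem.Dict String String :=
  PySem.Dict.insert d kv.1 (if PySem.Str.strIsdigit kv.2 then kv.2 else "\"" ++ kv.2 ++ "\"")

theorem aLoop_eq_pairs (xs : List String) : ∀ (n : Nat) (d : PySem.Dict String String) (last : String),
    ((PySem.List.enumerate xs ((2 * n + 1 : Nat) : Int)).foldl aStep (d, last)).1
      = (pyPairs xs).foldl bStep d := by
  induction xs using pyPairs.induct with
  | case1 a b rest ih =>
    intro n d last
    have h1 : ((2 * n + 1 : Nat) : Int) ≠ 0 := by omega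
    have m1 : PySem.Int.mod ((2 * n + 1 : Nat) : Int) 2 ≠ 0 := by
      rw [PySem.Int.mod_eq_emod_of_pos (by omega)]; omega
    have h2 : ((2 * n + 1 : Nat) : Int) + 1 ≠ 0 := by omega
    have m2 : PySem.Int.mod (((2 * n + 1 : Nat) : Int) + 1) 2 = 0 := by
      rw [PySem.Int.mod_eq_emod_of_pos (by omega)]; omega
    have hs : (((2 * n + 1 : Nat) : Int) + 1) + 1 = ((2 * (n + 1) + 1 : Nat) : Int) := by push_cast; ring
    simp only [PySem.List.enumerate_cons, List.foldl_cons, pyPairs]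
    rw [hs]
    have stepA : aStep (d, last) (((2 * n + 1 : Nat) : Int), a) = (d, a) := by
      simp only [aStep, beq_iff_eq, bne_iff_ne, ne_eq]
      rw [if_neg h1, if_pos m1]
    have stepB : aStep (d, a) (((2 * n + 1 : Nat) : Int) + 1, b) = (bStep d (a, b), a) := by
      simp only [aStep, bStep, beq_iff_eq, bne_iff_ne, ne_eq]
      rw [if_neg h2, if_neg (by simpa using m2)]
      split_ifs <;> rfl
    rw [stepA, stepB, ih]
  | case2 l hne =>
    intro n d last
    match l, hne with
    | [], _ =>
      simp [PySem.List.enumerate_nil, pyPairs]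
    | [a], _ =>
      have h1 : ((2 * n + 1 : Nat) : Int) ≠ 0 := by omega
      have m1 : PySem.Int.mod ((2 * n + 1 : Nat) : Int) 2 ≠ 0 := by
        rw [PySem.Int.mod_eq_emod_of_pos (by omega)]; omega
      simp only [PySem.List.enumerate_cons, PySem.List.enumerate_nil, List.foldl_cons,
        List.foldl_nil, pyPairs, aStep, beq_iff_eq, bne_iff_ne, ne_eq]
      rw [if_neg h1, if_pos m1]
    | a :: b :: r, h => exact absurd rfl (h a b r)

-- B's staged fold (quote pass then zip) is the pair fold
theorem bFold_eq_pairs (ks vs : List String) (d : PySem.Dict String String) :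
    (ks.zip (vs.map (fun v => if PySem.Str.strIsdigit v then v else "\"" ++ v ++ "\""))).foldl
        (fun d kv => PySem.Dict.insert d kv.1 kv.2) d
      = (ks.zip vs).foldl bStep d := by
  induction ks generalizing vs d with
  | nil => rfl
  | cons k ks ih =>
    cases vs with
    | nil => rfl
    | cons v vs =>
      simp only [List.map_cons, List.zip_cons_cons, List.foldl_cons]
      rw [ih]
      rfl

theorem ports_agree (args : List String) :
    create_config_values_py args = create_config_values_py_alt args := by
  unfold create_config_values_py create_config_values_py_alt
  rw [slice_odd_eq, slice_even_eq]
  simp only [Option.getD_some]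
  rw [bFold_eq_pairs]
  cases args with
  | nil => rfl
  | cons x rest =>
    rw [List.tail_cons, zip_slices_eq_pairs String rest x]
    simp only [PySem.List.enumerate_cons, List.foldl_cons]
    have h0 : aStep (PySem.Dict.empty, "") ((0 : Int), x) = (PySem.Dict.empty, "") := by
      simp [aStep]
    rw [h0]
    have h1 : ((0 : Int) + 1) = ((2 * 0 + 1 : Nat) : Int) := by norm_num
    rw [h1, aLoop_eq_pairs rest 0 PySem.Dict.empty ""]

-- ===== VERDICT (by name: the statement is the Claim_ definition above) =====
theorem create_config_values_py_spec : Claim_equal_create_config_values_py := by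
  intro args _
  unfold Spec_create_config_values_py
  exact ports_agree args
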